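-- pv_equiv track=rewrite | github.com/Inc44/Birthday | benchmark.py | extract_commands
-- ===== SOURCE A (Python) =====
-- from typing import List
--
-- def extract_commands(lines: List[str], ext: str) -> List[str]:
-- 	commands = []
-- 	for i in range(len(lines)):
-- 		line = lines[i].strip()
-- 		if not line:
-- 			continue
-- 		if ext == ".py":
-- 			if line.startswith("#"):
-- 				payload = line[1:].strip()
-- 				if payload:
-- 					commands.append(payload)
-- 				continue
-- 			break
-- 		if ext == ".ml":
-- 			if line.startswith("(*") and "*)" in line:
-- 				payload = line[2 : line.index("*)")].strip()
-- 				if payload: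
-- 					commands.append(payload)
-- 				continue
-- 			break
-- 		if ext == ".lua":
-- 			if line.startswith("--"):
-- 				payload = line[2:].strip()
-- 				if payload:
-- 					commands.append(payload)
-- 				continue
-- 			break
-- 		if line.startswith("//"):
-- 			payload = line[2:].strip()
-- 			if payload:
-- 				commands.append(payload)
-- 			continue
-- 		break
-- 	return commands
-- ===== SOURCE B (Python) =====
-- from typing import List
--
-- # Marker table: ext -> (start marker, optional end marker).
-- MARKERS = {".py": ("#", None), ".ml": ("(*", "*)"), ".lua": ("--", None)}
--
-- def extract_commands(lines: List[str], ext: str) -> List[str]: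
-- 	# Right-to-left single pass: scan the lines in reverse, collecting payloads;
-- 	# a non-blank non-comment line clears the accumulator, since nothing after
-- 	# the first non-comment line can belong to the leading comment block.
-- 	start, end = MARKERS.get(ext, ("//", None))
-- 	acc = []  # payloads of the current suffix's leading comment block, reversed
-- 	for raw in reversed(lines):
-- 		line = raw.strip()
-- 		if not line:
-- 			continue
-- 		cut = None if end is None else line.find(end)
-- 		if line.startswith(start) and (cut is None or cut >= 0):
-- 			payload = line[len(start):cut].strip()
-- 			if payload:
-- 				acc.append(payload)
-- 		else:
-- 			acc.clear()
-- 	acc.reverse()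
-- 	return acc
-- ===== Notes on version B (the rewrite author's own statement) =====
-- stated objective: alternative
-- what changed: B replaces A's left-to-right loop with break and four hard-coded per-extension branches by a right-to-left single pass driven by a marker table (start, optional end): scanning reversed(lines), each comment line's payload is appended and any non-blank non-comment line clears the accumulator, since nothing after the first non-comment line belongs to the leading comment block; the result is reversed at the end.
import Mathlib
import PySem

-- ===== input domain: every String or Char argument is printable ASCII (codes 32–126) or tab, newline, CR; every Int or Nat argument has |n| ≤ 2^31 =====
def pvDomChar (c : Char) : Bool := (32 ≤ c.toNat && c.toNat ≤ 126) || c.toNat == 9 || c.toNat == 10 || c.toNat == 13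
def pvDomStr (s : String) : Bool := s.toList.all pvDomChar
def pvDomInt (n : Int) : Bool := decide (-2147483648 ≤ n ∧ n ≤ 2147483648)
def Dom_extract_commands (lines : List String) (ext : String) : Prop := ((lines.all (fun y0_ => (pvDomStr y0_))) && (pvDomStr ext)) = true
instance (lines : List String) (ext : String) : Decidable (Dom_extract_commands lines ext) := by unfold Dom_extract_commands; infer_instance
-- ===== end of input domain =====

-- B replaces A's left-to-right break loop with four hard-coded ext branches by a
-- right-to-left single pass over a marker table, clearing the accumulator at each
-- non-comment line (objective: alternative; same cost).

-- ===== PORT A =====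
-- the fused loop: per line, strip, skip blank, dispatch on ext, append payload or break
def extractALoop (ext : String) (commands : List String) : List String → List String
  | [] => commands
  | l :: rest =>
    let line := PySem.Str.strip l
    if line == "" then extractALoop ext commands rest
    else if ext == ".py" then
      if PySem.Str.startswith line "#" then
        let payload := PySem.Str.strip (PySem.Str.slice line (some 1) none)
        extractALoop ext (if payload == "" then commands else commands ++ [payload]) rest
      else commands
    else if ext == ".ml" then
      if PySem.Str.startswith line "(*" && PySem.Str.isIn "*)" line then
        let payload := PySem.Str.strip (PySem.Str.slice line (some 2) (some (PySem.Str.find line "*)")))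
        extractALoop ext (if payload == "" then commands else commands ++ [payload]) rest
      else commands
    else if ext == ".lua" then
      if PySem.Str.startswith line "--" then
        let payload := PySem.Str.strip (PySem.Str.slice line (some 2) none)
        extractALoop ext (if payload == "" then commands else commands ++ [payload]) rest
      else commands
    else
      if PySem.Str.startswith line "//" then
        let payload := PySem.Str.strip (PySem.Str.slice line (some 2) none)
        extractALoop ext (if payload == "" then commands else commands ++ [payload]) rest
      else commands

def extract_commands (lines : List String) (ext : String) : List String :=
  extractALoop ext [] lines

-- ===== PORT B =====
-- Source B's marker table MARKERS: ext -> (start marker, optional end marker)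
def pvMarkers : PySem.Dict String (String × Option String) :=
  PySem.Dict.ofList [(".py", ("#", none)), (".ml", ("(*", some "*)")), (".lua", ("--", none))]

-- one iteration of Source B's reversed-scan loop body (acc holds payloads reversed)
def stepB (start : String) (end? : Option String) (acc : List String) (raw : String) : List String :=
  let line := PySem.Str.strip raw
  if line == "" then acc
  else
    let cut : Option Int := match end? with | none => none | some e => some (PySem.Str.find line e)
    if PySem.Str.startswith line start &&
        (match cut with | none => true | some j => decide (0 ≤ j)) then
      let payload := PySem.Str.strip (PySem.Str.slice line (some (PySem.Str.len start)) cut)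
      if payload == "" then acc else acc ++ [payload]
    else []

def extract_commands_alt (lines : List String) (ext : String) : List String :=
  let m := pvMarkers.getD ext ("//", none)
  ((lines.reverse).foldl (stepB m.1 m.2) []).reverse

-- ===== PRECONDITION & SPEC =====
def Spec_extract_commands (lines : List String) (ext : String) (out : List String) : Prop := out = extract_commands_alt lines ext
instance (lines : List String) (ext : String) (out : List String) : Decidable (Spec_extract_commands lines ext out) := by unfold Spec_extract_commands; infer_instance

-- ===== CLAIM (what is proved, stated in full; the proofs are below) =====
def Claim_equal_extract_commands : Prop := ∀ (lines : List String) (ext : String), Dom_extract_commands lines ext → Spec_extract_commands lines ext (extract_commands lines ext)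

-- ===== LEMMAS AND PROOFS =====

-- proof-side: the front-to-back recurrence B's reversed scan computes
def specG (start : String) (end? : Option String) : List String → List String
  | [] => []
  | raw :: rest =>
    let line := PySem.Str.strip raw
    if line == "" then specG start end? rest
    else
      let cut : Option Int := match end? with | none => none | some e => some (PySem.Str.find line e)
      if PySem.Str.startswith line start &&
          (match cut with | none => true | some j => decide (0 ≤ j)) then
        let payload := PySem.Str.strip (PySem.Str.slice line (some (PySem.Str.len start)) cut)
        if payload == "" then specG start end? rest else payload :: specG start end? rest
      else []

theorem foldl_rev_eq_specG (s : String) (e : Option String) (ls : List String) :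
    ((ls.reverse).foldl (stepB s e) []).reverse = specG s e ls := by
  induction ls with
  | nil => rfl
  | cons raw rest ih =>
    have h : (raw :: rest).reverse.foldl (stepB s e) [] =
        stepB s e (rest.reverse.foldl (stepB s e) []) raw := by
      simp [List.foldl_append]
    rw [h]
    have hR : rest.reverse.foldl (stepB s e) [] = (specG s e rest).reverse := by
      rw [← ih, List.reverse_reverse]
    rw [hR]
    simp only [stepB, specG]
    split_ifs with h0 h1 h2 <;> simp

theorem alt_eq_specG (lines : List String) (ext : String) :
    extract_commands_alt lines ext =
      specG (pvMarkers.getD ext ("//", none)).1 (pvMarkers.getD ext ("//", none)).2 lines := by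
  rw [extract_commands_alt]; exact foldl_rev_eq_specG _ _ lines

theorem find_nonneg_iff_isIn (s sub : String) :
    (0 ≤ PySem.Str.find s sub) ↔ PySem.Str.isIn sub s = true :=
  (PySem.Str.find_nonneg_iff s sub).trans (PySem.Str.isIn_iff_infix sub s).symm

theorem loop_eq_specG (ext : String) (rest : List String) (acc : List String) :
    extractALoop ext acc rest =
      acc ++ specG (pvMarkers.getD ext ("//", none)).1 (pvMarkers.getD ext ("//", none)).2 rest := by
  induction rest generalizing acc with
  | nil => simp [extractALoop, specG]
  | cons l rest ih =>
    rw [extractALoop]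
    by_cases h0 : PySem.Str.strip l == ""
    · simp only [specG, h0, if_true]
      exact ih acc
    · by_cases hpy : ext == ".py"
      · have hm : pvMarkers.getD ext ("//", none) = ("#", (none : Option String)) := by
          have : ext = ".py" := by simpa using hpy
          subst this; decide
        rw [hm] at ih ⊢
        simp only [specG, h0, if_false, Bool.false_eq_true, hpy, if_true]
        have hlen : PySem.Str.len "#" = 1 := by decide
        by_cases hc : PySem.Str.startswith (PySem.Str.strip l) "#"
        · by_cases hp : PySem.Str.strip (PySem.Str.slice (PySem.Str.strip l) (some 1) none) == ""
          · simp at hc hp; simp [hc, hp, ih acc]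
          · simp at hc hp; simp [hc, hp, ih (acc ++ [_])]
        · simp at hc; simp [hc]
      · by_cases hml : ext == ".ml"
        · have hm : pvMarkers.getD ext ("//", none) = ("(*", some "*)") := by
            have : ext = ".ml" := by simpa using hml
            subst this; decide
          rw [hm] at ih ⊢
          simp only [specG, h0, if_false, Bool.false_eq_true, hpy, hml, if_true]
          have hlen : PySem.Str.len "(*" = 2 := by decide
          have hfind : (0 ≤ PySem.Chars.find (PySem.Chars.strip l.toList) ['*', ')']) ↔
              PySem.Chars.isIn ['*', ')'] (PySem.Chars.strip l.toList) = true := by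
            simpa using find_nonneg_iff_isIn (PySem.Str.strip l) "*)"
          by_cases hs : PySem.Chars.startswith (PySem.Chars.strip l.toList) ['(', '*']
          · by_cases hin : PySem.Chars.isIn ['*', ')'] (PySem.Chars.strip l.toList)
            · have hf := hfind.2 hin
              by_cases hp : PySem.Str.strip (PySem.Str.slice (PySem.Str.strip l) (some 2)
                  (some (PySem.Str.find (PySem.Str.strip l) "*)"))) == ""
              · simp at hp; simp [hs, hin, hf, hp, ih acc]
              · simp at hp; simp [hs, hin, hf, hp, ih (acc ++ [_])]
            · have hf : ¬ (0 ≤ PySem.Chars.find (PySem.Chars.strip l.toList) ['*', ')']) :=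
                fun h => hin (hfind.1 h)
              simp [hs, hin, hf]
          · simp [hs]
        · by_cases hlua : ext == ".lua"
          · have hm : pvMarkers.getD ext ("//", none) = ("--", (none : Option String)) := by
              have : ext = ".lua" := by simpa using hlua
              subst this; decide
            rw [hm] at ih ⊢
            simp only [specG, h0, if_false, Bool.false_eq_true, hpy, hml, hlua]
            have hlen : PySem.Str.len "--" = 2 := by decide
            by_cases hc : PySem.Str.startswith (PySem.Str.strip l) "--"
            · by_cases hp : PySem.Str.strip (PySem.Str.slice (PySem.Str.strip l) (some 2) none) == ""
              · simp at hc hp; simp [hc, hp, ih acc]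
              · simp at hc hp; simp [hc, hp, ih (acc ++ [_])]
            · simp at hc; simp [hc]
          · have hm : pvMarkers.getD ext ("//", none) = ("//", (none : Option String)) := by
              have h1 : ¬ (ext = ".py") := by simpa using hpy
              have h2 : ¬ (ext = ".ml") := by simpa using hml
              have h3 : ¬ (ext = ".lua") := by simpa using hlua
              have b1 : (".py" == ext) = false := beq_eq_false_iff_ne.mpr (fun h => h1 h.symm)
              have b2 : (".ml" == ext) = false := beq_eq_false_iff_ne.mpr (fun h => h2 h.symm)
              have b3 : (".lua" == ext) = false := beq_eq_false_iff_ne.mpr (fun h => h3 h.symm)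
              simp [pvMarkers, PySem.Dict.getD, PySem.Dict.get?, PySem.Dict.ofList,
                PySem.Dict.empty, PySem.Dict.update, PySem.Dict.insert,
                List.find?, b1, b2, b3]
            rw [hm] at ih ⊢
            simp only [specG, h0, if_false, Bool.false_eq_true, hpy, hml, hlua]
            have hlen : PySem.Str.len "//" = 2 := by decide
            by_cases hc : PySem.Str.startswith (PySem.Str.strip l) "//"
            · by_cases hp : PySem.Str.strip (PySem.Str.slice (PySem.Str.strip l) (some 2) none) == ""
              · simp at hc hp; simp [hc, hp, ih acc]
              · simp at hc hp; simp [hc, hp, ih (acc ++ [_])]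
            · simp at hc; simp [hc]

-- ===== VERDICT (by name: the statement is the Claim_ definition above) =====
theorem extract_commands_spec : Claim_equal_extract_commands := by
  intro lines ext _
  show extract_commands lines ext = extract_commands_alt lines ext
  rw [extract_commands, alt_eq_specG, loop_eq_specG, List.nil_append]
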